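-- pv_equiv track=rewrite | github.com/qeyokoryy/PythonProject | егэ подготовка/задание 23/дз/10.py | f
-- ===== SOURCE A (Python) =====
-- def f(s,e):
--     if s == e:
--         return 1
--     if s < e:
--         return 0
--     if s%10 != 0:
--         return f(s - s//10, e) + f(s - s%10, e)+ f(s//2, e)
--     return f(s - s//10 , e) + f(s - 2, e)+ f(s//2, e)
-- ===== SOURCE B (Python) =====
-- def f(s, e):
--     # Bottom-up dynamic programming over the states e..s instead of
--     # exponential triple recursion.
--     if s <= e:
--         return 1 if s == e else 0
--     dp = {e: 1}
--     for v in range(e + 1, s + 1):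
--         if v % 10 != 0:
--             kids = (v - v // 10, v - v % 10, v // 2)
--         else:
--             kids = (v - v // 10, v - 2, v // 2)
--         dp[v] = sum(dp.get(k, 0) for k in kids)
--     return dp.get(s, 0)  # s is always a key here (the loop reaches s)
-- ===== Notes on version B (the rewrite author's own statement) =====
-- stated objective: alternative
-- what changed: Replaced the exponential triple recursion by a bottom-up dynamic-programming table dp[v] over the states v = e..s, so each state is computed once.
import Mathlib
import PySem

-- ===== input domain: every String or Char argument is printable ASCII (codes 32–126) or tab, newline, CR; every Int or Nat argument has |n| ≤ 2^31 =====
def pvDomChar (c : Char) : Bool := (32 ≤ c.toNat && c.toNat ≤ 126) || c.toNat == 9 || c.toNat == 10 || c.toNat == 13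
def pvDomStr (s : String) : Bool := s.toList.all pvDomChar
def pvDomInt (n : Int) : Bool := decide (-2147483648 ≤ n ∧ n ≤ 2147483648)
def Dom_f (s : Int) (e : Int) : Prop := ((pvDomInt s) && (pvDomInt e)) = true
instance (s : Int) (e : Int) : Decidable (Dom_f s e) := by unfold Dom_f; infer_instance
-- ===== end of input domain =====

-- B replaces A's triple recursion by a bottom-up dynamic-programming table over the states e..s.

-- ===== PORT A =====
-- A's recursion does not terminate for e < 9 < s-ish states: any state t with e < t ≤ 9 has
-- t - t//10 = t (or 0 - 0 = 0), so Python raises RecursionError there; those inputs are outside Pre_f.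
-- The port therefore uses fuel: on Pre_f every recursive call decreases s by at least 1 while s > e,
-- so fuel (s - e).toNat + 1 reproduces A exactly there (proved via fGo_eq below).
def fGo : Nat → Int → Int → Int
  | 0, _, _ => 0
  | n+1, s, e =>
    if s = e then 1
    else if s < e then 0
    else if PySem.Int.mod s 10 ≠ 0 then
      fGo n (s - PySem.Int.floordiv s 10) e + fGo n (s - PySem.Int.mod s 10) e
        + fGo n (PySem.Int.floordiv s 2) e
    else
      fGo n (s - PySem.Int.floordiv s 10) e + fGo n (s - 2) e
        + fGo n (PySem.Int.floordiv s 2) e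

def f (s : Int) (e : Int) : Int := fGo ((s - e).toNat + 1) s e

-- ===== PORT B =====
def kidsOf (v : Int) : Int × Int × Int :=
  if PySem.Int.mod v 10 ≠ 0 then
    (v - PySem.Int.floordiv v 10, v - PySem.Int.mod v 10, PySem.Int.floordiv v 2)
  else
    (v - PySem.Int.floordiv v 10, v - 2, PySem.Int.floordiv v 2)

def fStep (dp : PySem.Dict Int Int) (v : Int) : PySem.Dict Int Int :=
  let k := kidsOf v
  dp.insert v (dp.getD k.1 0 + dp.getD k.2.1 0 + dp.getD k.2.2 0)

def f_alt (s : Int) (e : Int) : Int :=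
  if s ≤ e then (if s = e then 1 else 0)
  else
    let dp := (PySem.Dict.empty : PySem.Dict Int Int).insert e 1
    let dp := (PySem.List.pyRange (e + 1) (s + 1) 1).foldl fStep dp
    dp.getD s 0   -- Source B's dp.get(s, 0); s is always a key here

-- ===== PRECONDITION & SPEC =====
-- Pre_f is exactly where Python's A returns: s ≤ e answers immediately; otherwise any state
-- t with e < t ≤ 9 self-loops, and the leftmost call chain from s > e ≥ anything < 9 reaches
-- such a state, so A raises RecursionError unless 9 ≤ e.
def Pre_f (s : Int) (e : Int) : Prop := s ≤ e ∨ 9 ≤ e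
instance (s : Int) (e : Int) : Decidable (Pre_f s e) := by unfold Pre_f; infer_instance
def pvWitness_f : Int × Int := (20, 9)

def Spec_f (s : Int) (e : Int) (out : Int) : Prop := out = f_alt s e
instance (s : Int) (e : Int) (out : Int) : Decidable (Spec_f s e out) := by unfold Spec_f; infer_instance

-- ===== CLAIM (what is proved, stated in full; the proofs are below) =====
def Claim_equal_f : Prop := ∀ (s : Int) (e : Int), Dom_f s e → Pre_f s e → Spec_f s e (f s e)

-- ===== LEMMAS AND PROOFS =====

lemma fStep_def (dp : PySem.Dict Int Int) (v : Int) :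
    fStep dp v = dp.insert v (dp.getD (kidsOf v).1 0 + dp.getD (kidsOf v).2.1 0 + dp.getD (kidsOf v).2.2 0) := rfl

-- arithmetic facts about the three children of a state s ≥ 10
lemma kid_bounds {s : Int} (hs : 10 ≤ s) :
    s - PySem.Int.floordiv s 10 ≤ s - 1 ∧
    (PySem.Int.mod s 10 ≠ 0 → s - PySem.Int.mod s 10 ≤ s - 1) ∧
    s - 2 ≤ s - 1 ∧ PySem.Int.floordiv s 2 ≤ s - 1 := by
  rw [PySem.Int.floordiv_eq_ediv_of_pos (a := s) (b := 10) (by norm_num),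
      PySem.Int.floordiv_eq_ediv_of_pos (a := s) (b := 2) (by norm_num),
      PySem.Int.mod_eq_emod_of_pos (a := s) (b := 10) (by norm_num)]
  omega

lemma fGo_of_lt (n : Nat) {s e : Int} (h : s < e) : fGo n s e = 0 := by
  cases n with
  | zero => rfl
  | succ n => simp only [fGo]; rw [if_neg (by omega), if_pos h]

-- fuel irrelevance: any two sufficient fuels agree (on Pre_f's non-trivial side 9 ≤ e)
lemma fGo_eq : ∀ (n m : Nat) (s e : Int), 9 ≤ e → s - e < (n : Int) → s - e < (m : Int) →
    fGo n s e = fGo m s e := by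
  intro n
  induction n with
  | zero =>
    intro m s e _ hn _
    rw [fGo_of_lt 0 (by omega), fGo_of_lt m (by omega)]
  | succ n ih =>
    intro m s e he hn hm
    match m with
    | 0 => rw [fGo_of_lt (n+1) (by omega), fGo_of_lt 0 (by omega)]
    | Nat.succ m =>
      by_cases h1 : s = e
      · simp [fGo, h1]
      · by_cases h2 : s < e
        · rw [fGo_of_lt (n+1) h2, fGo_of_lt (m+1) h2]
        · have hs10 : 10 ≤ s := by omega
          obtain ⟨k1, k2, k3, k4⟩ := kid_bounds hs10
          simp only [fGo]
          rw [if_neg h1, if_neg h2, if_neg h1, if_neg h2]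
          by_cases h3 : PySem.Int.mod s 10 = 0
          · rw [if_neg (not_not_intro h3), if_neg (not_not_intro h3),
                ih m _ e he (by omega) (by omega), ih m _ e he (by omega) (by omega),
                ih m _ e he (by omega) (by omega)]
          · have k2' := k2 h3
            rw [if_pos h3, if_pos h3,
                ih m _ e he (by omega) (by omega), ih m _ e he (by omega) (by omega),
                ih m _ e he (by omega) (by omega)]

lemma f_eq_fGo {n : Nat} {s e : Int} (he : 9 ≤ e) (hn : s - e < (n : Int)) :
    f s e = fGo n s e := by
  unfold f
  exact fGo_eq _ n s e he (by omega) hn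

lemma f_self (e : Int) : f e e = 1 := by simp [f, fGo]

lemma f_lt {s e : Int} (h : s < e) : f s e = 0 := fGo_of_lt _ h

-- the recurrence A satisfies on Pre_f, phrased through B's kidsOf
lemma f_rec {s e : Int} (he : 9 ≤ e) (hlt : e < s) :
    f s e = f (kidsOf s).1 e + f (kidsOf s).2.1 e + f (kidsOf s).2.2 e := by
  have hs10 : 10 ≤ s := by omega
  obtain ⟨k1, k2, k3, k4⟩ := kid_bounds hs10
  have hn : 1 ≤ ((s - e).toNat : Int) := by omega
  conv_lhs => rw [f]
  rw [fGo]
  rw [if_neg (by omega), if_neg (by omega)]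
  unfold kidsOf
  by_cases h3 : PySem.Int.mod s 10 = 0
  · rw [if_neg (not_not_intro h3), if_neg (not_not_intro h3)]
    rw [← f_eq_fGo he (by omega), ← f_eq_fGo he (by omega), ← f_eq_fGo he (by omega)]
  · have k2' := k2 h3
    rw [if_pos h3, if_pos h3]
    rw [← f_eq_fGo he (by omega), ← f_eq_fGo he (by omega), ← f_eq_fGo he (by omega)]

-- the DP table after processing states e+1 .. e+d holds exactly f's values on [e, e+d]
lemma dp_invariant (e : Int) (he : 9 ≤ e) : ∀ (d : Nat) (k : Int),
    ((PySem.List.pyRange (e + 1) (e + d + 1) 1).foldl fStep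
        ((PySem.Dict.empty : PySem.Dict Int Int).insert e 1)).getD k 0
      = if e ≤ k ∧ k ≤ e + d then f k e else 0 := by
  intro d
  induction d with
  | zero =>
    intro k
    rw [PySem.List.pyRange_one_eq_nil (by omega)]
    simp only [List.foldl_nil, PySem.Dict.getD_insert, PySem.Dict.getD_empty]
    by_cases hk : k = e
    · rw [if_pos hk, if_pos (by omega), hk, f_self]
    · rw [if_neg hk, if_neg (by omega)]
  | succ d ih =>
    intro k
    push_cast
    rw [show e + ((d : Int) + 1) + 1 = (e + (d : Int) + 1) + 1 by ring,
        PySem.List.pyRange_one_succ_right (by omega),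
        List.foldl_append, List.foldl_cons, List.foldl_nil, fStep_def,
        PySem.Dict.getD_insert]
    obtain ⟨k1, k2, k3, k4⟩ := kid_bounds (s := e + (d : Int) + 1) (by omega)
    have hkid : (kidsOf (e + (d : Int) + 1)).1 ≤ e + (d : Int) ∧
        (kidsOf (e + (d : Int) + 1)).2.1 ≤ e + (d : Int) ∧
        (kidsOf (e + (d : Int) + 1)).2.2 ≤ e + (d : Int) := by
      unfold kidsOf
      by_cases h3 : PySem.Int.mod (e + (d : Int) + 1) 10 = 0
      · rw [if_neg (not_not_intro h3)]
        dsimp only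
        exact ⟨by omega, by omega, by omega⟩
      · rw [if_pos h3]
        have := k2 h3
        dsimp only
        exact ⟨by omega, by omega, by omega⟩
    have hgetD : ∀ i : Int, i ≤ e + (d : Int) →
        ((PySem.List.pyRange (e + 1) (e + (d : Int) + 1) 1).foldl fStep
          ((PySem.Dict.empty : PySem.Dict Int Int).insert e 1)).getD i 0 = f i e := by
      intro i hi
      rw [ih i]
      by_cases hle : e ≤ i
      · rw [if_pos ⟨hle, hi⟩]
      · rw [if_neg (by omega), f_lt (by omega)]
    by_cases hk : k = e + (d : Int) + 1
    · rw [if_pos hk, hgetD _ hkid.1, hgetD _ hkid.2.1, hgetD _ hkid.2.2,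
          ← f_rec he (by omega), if_pos (by omega), hk]
    · rw [if_neg hk, ih k]
      by_cases hin : e ≤ k ∧ k ≤ e + (d : Int)
      · rw [if_pos hin, if_pos (by omega)]
      · rw [if_neg hin, if_neg (by omega)]

-- ===== VERDICT (by name: the statement is the Claim_ definition above) =====
theorem f_spec : Claim_equal_f := by
  unfold Claim_equal_f Spec_f
  intro s e _ hpre
  by_cases hle : s ≤ e
  · by_cases heq : s = e
    · subst heq
      rw [f_self]
      unfold f_alt
      rw [if_pos le_rfl, if_pos rfl]
    · rw [f_lt (by omega)]
      unfold f_alt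
      rw [if_pos hle, if_neg heq]
  · have he : 9 ≤ e := by
      rcases hpre with h | h
      · omega
      · exact h
    unfold f_alt
    rw [if_neg hle]
    have hinv := dp_invariant e he (s - e).toNat s
    rw [show e + (((s - e).toNat : Nat) : Int) + 1 = s + 1 by omega] at hinv
    rw [hinv, if_pos (by omega)]
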